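-- pv_equiv track=rewrite | github.com/gkbichara/Leetcode-Answers | JewelsAndStones/jewelsAndStones.py | numJewelsInStones
-- ===== SOURCE A (Python) =====
-- def numJewelsInStones(jewels, stones):
--     """
--     :type jewels: str
--     :type stones: str
--     :rtype: int
--     """
--
--     counter = 0
--
--     answers = set(jewels)
--
--     for stone in stones:
--         if stone in answers:
--             counter += 1
--         else:
--             continue
--
--     return counter
-- ===== SOURCE B (Python) =====
-- def numJewelsInStones(jewels, stones):
--     """
--     :type jewels: str
--     :type stones: str
--     :rtype: int
--     """
--     counts = {}
--     for s in stones: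
--         counts[s] = counts.get(s, 0) + 1
--     return sum(counts.get(j, 0) for j in set(jewels))
-- ===== Notes on version B (the rewrite author's own statement) =====
-- stated objective: idiomatic
-- what changed: B builds a frequency table of the stones once and sums the table's counts over the distinct jewel characters, instead of scanning the stones with a membership test against a jewel set.
import Mathlib
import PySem

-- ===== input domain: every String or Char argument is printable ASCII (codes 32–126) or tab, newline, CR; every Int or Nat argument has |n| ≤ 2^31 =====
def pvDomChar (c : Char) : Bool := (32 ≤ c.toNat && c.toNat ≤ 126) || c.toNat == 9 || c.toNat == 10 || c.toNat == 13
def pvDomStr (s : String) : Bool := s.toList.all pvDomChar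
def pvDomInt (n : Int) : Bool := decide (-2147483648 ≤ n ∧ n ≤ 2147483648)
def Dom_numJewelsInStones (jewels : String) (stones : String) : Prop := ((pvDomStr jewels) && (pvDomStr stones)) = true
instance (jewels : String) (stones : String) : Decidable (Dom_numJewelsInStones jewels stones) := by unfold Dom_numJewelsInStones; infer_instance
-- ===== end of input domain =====

-- B builds a frequency table of the stones once and sums its counts over the distinct jewel
-- characters, instead of scanning the stones with a membership test (objective: idiomatic).

-- ===== PORT A =====
def numJewelsInStones (jewels : String) (stones : String) : Int :=
  let answers : PySem.Set Char := PySem.Set.ofList jewels.toList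
  stones.toList.foldl
    (fun counter stone => if PySem.Set.contains answers stone then counter + 1 else counter) 0

-- ===== PORT B =====
def numJewelsInStones_alt (jewels : String) (stones : String) : Int :=
  let counts : PySem.Dict Char Int :=
    stones.toList.foldl (fun d s => d.insert s (d.getD s 0 + 1)) PySem.Dict.empty
  (PySem.Set.ofList jewels.toList).foldl (fun acc j => acc + counts.getD j 0) 0

-- ===== PRECONDITION & SPEC =====
def Spec_numJewelsInStones (jewels : String) (stones : String) (out : Int) : Prop := out = numJewelsInStones_alt jewels stones
instance (jewels : String) (stones : String) (out : Int) : Decidable (Spec_numJewelsInStones jewels stones out) := by unfold Spec_numJewelsInStones; infer_instance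

-- ===== CLAIM (what is proved, stated in full; the proofs are below) =====
def Claim_equal_numJewelsInStones : Prop := ∀ (jewels : String) (stones : String), Dom_numJewelsInStones jewels stones → Spec_numJewelsInStones jewels stones (numJewelsInStones jewels stones)

-- ===== LEMMAS AND PROOFS =====

-- splitting a membership count at the head of a duplicate-free list of sought elements
lemma countP_mem_cons (l : List Char) (j : Char) (js : List Char) (hj : j ∉ js) :
    l.countP (fun s => decide (s ∈ j :: js)) =
      l.count j + l.countP (fun s => decide (s ∈ js)) := by
  induction l with
  | nil => simp
  | cons x l ih =>
    simp only [List.countP_cons, List.count_cons, ih]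
    by_cases hx : x = j
    · simp [hx, hj]; omega
    · (by_cases hmem : x ∈ js <;> simp [hx, hmem]); omega

-- summing per-jewel counts over distinct jewels equals one membership count over the stones
lemma sum_counts_eq_countP (js : List Char) (hnd : js.Nodup) (l : List Char) (acc : Int) :
    js.foldl (fun acc j => acc + (l.count j : Int)) acc =
      acc + (l.countP (fun s => decide (s ∈ js)) : Int) := by
  induction js generalizing acc with
  | nil => simp
  | cons j js ih =>
    have hj : j ∉ js := (List.nodup_cons.mp hnd).1
    have hnd' : js.Nodup := (List.nodup_cons.mp hnd).2
    rw [List.foldl_cons, ih hnd', countP_mem_cons l j js hj]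
    push_cast
    ring

-- ===== VERDICT (by name: the statement is the Claim_ definition above) =====
theorem numJewelsInStones_spec : Claim_equal_numJewelsInStones := by
  intro jewels stones _
  unfold Spec_numJewelsInStones numJewelsInStones numJewelsInStones_alt
  have hcnt : ∀ j : Char,
      (stones.toList.foldl (fun d s => d.insert s (d.getD s 0 + 1)) PySem.Dict.empty).getD j 0
        = (stones.toList.count j : Int) := by
    intro j
    rw [PySem.Dict.getD_foldl_insert_add_one]
    simp [PySem.Dict.getD_empty]
  simp only [hcnt]
  rw [sum_counts_eq_countP _ (PySem.Set.nodup_ofList jewels.toList) stones.toList 0,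
      PySem.List.foldl_count_if]
  have hEq : ∀ a, (PySem.Set.ofList jewels.toList).contains a
      = decide (a ∈ PySem.Set.ofList jewels.toList) := by
    intro a
    by_cases h : a ∈ PySem.Set.ofList jewels.toList <;> simp [h]
  rw [funext hEq]
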